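-- pv_equiv track=rewrite | github.com/AdvaitS/mancala | mancala_helpers.py | get_drop_position
-- ===== SOURCE A (Python) =====
-- def mancala_of(player: int) -> int:
--     if player == 0:
--         return 8
--     else:
--         return 17
--
-- def pits_of(player: int) -> list:
--     if player == 0:
--         return list(range(8))
--     else:
--         return list(range(9,17))
--
-- def player_who_can_do(move: int) -> int:
--     if move in pits_of(0):
--         return 0
--     else:
--         return 1
--
-- def get_drop_position(pit, board):
--     dummy_board = board
--     moves = dummy_board[pit]
--     player = player_who_can_do(pit)
--     if dummy_board[pit] == 0:
--         return pit
--     while moves > 0: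
--         if pit+1%len(dummy_board) == mancala_of(1 - player):
--             pit += 1
--             continue
--         moves -= 1
--         pit += 1
--     return pit%len(dummy_board)
-- ===== SOURCE B (Python) =====
-- def get_drop_position(pit, board):
--     stones = board[pit]
--     if stones == 0:
--         return pit
--     opp_mancala = 17 if 0 <= pit <= 7 else 8
--     skip = 1 if pit < opp_mancala <= pit + stones else 0
--     return (pit + stones + skip) % len(board)
-- ===== Notes on version B (the rewrite author's own statement) =====
-- stated objective: alternative
-- what changed: Replaced the stone-by-stone while loop with closed-form arithmetic: final pit = (pit + stones + skip) % len, where skip is 1 iff the opponent's mancala index is passed during the sowing; Pre_ excludes out-of-range pit (A raises IndexError) and a negative stone count at the chosen pit, which is not a meaningful mancala state and on which neither value is specified.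
-- outside the precondition, e.g. on get_drop_position(0, [-3, 5]): A returns 0, B returns 1
import Mathlib
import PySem

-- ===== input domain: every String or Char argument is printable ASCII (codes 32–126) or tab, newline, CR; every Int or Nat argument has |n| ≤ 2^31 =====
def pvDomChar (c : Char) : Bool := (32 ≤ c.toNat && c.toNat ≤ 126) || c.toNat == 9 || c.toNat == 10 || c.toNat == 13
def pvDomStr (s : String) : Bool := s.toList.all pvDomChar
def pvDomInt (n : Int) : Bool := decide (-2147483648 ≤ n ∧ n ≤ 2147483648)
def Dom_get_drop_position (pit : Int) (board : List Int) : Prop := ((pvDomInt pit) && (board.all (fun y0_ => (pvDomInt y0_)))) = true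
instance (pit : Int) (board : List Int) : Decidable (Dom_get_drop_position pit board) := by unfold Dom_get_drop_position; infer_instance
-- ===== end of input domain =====

-- B replaces A's stone-by-stone while loop with closed-form arithmetic (one modular formula instead of per-stone iteration).

-- ===== PORT A =====
def mancala_of (player : Int) : Int := if player == 0 then 8 else 17

def pits_of (player : Int) : List Int :=
  if player == 0 then PySem.List.pyRange 0 8 1 else PySem.List.pyRange 9 17 1

def player_who_can_do (move : Int) : Int :=
  if (pits_of 0).contains move then 0 else 1

-- A's while loop: skips one extra step when pit + 1%n equals the opponent's mancala
def dropLoop (n M : Int) (moves pit : Int) : Int :=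
  if moves > 0 then
    if pit + PySem.Int.mod 1 n == M then dropLoop n M moves (pit + 1)
    else dropLoop n M (moves - 1) (pit + 1)
  else pit
termination_by 2 * moves.toNat + (if pit + PySem.Int.mod 1 n == M then 1 else 0)
decreasing_by
  · rename_i hpos hcond
    have h2 : ¬ (pit + 1 + PySem.Int.mod 1 n == M) = true := by
      simp only [beq_iff_eq] at *; omega
    simp [hcond, h2]
  · rename_i hpos _
    simp only [beq_iff_eq] at *
    split <;> omega

def get_drop_position (pit : Int) (board : List Int) : Int :=
  let dummy_board := board
  let moves := (PySem.List.pyGet? dummy_board pit).getD 0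
  let player := player_who_can_do pit
  if (PySem.List.pyGet? dummy_board pit).getD 0 == 0 then pit
  else PySem.Int.mod (dropLoop dummy_board.length (mancala_of (1 - player)) moves pit) dummy_board.length

-- ===== PORT B =====
def get_drop_position_alt (pit : Int) (board : List Int) : Int :=
  let stones := (PySem.List.pyGet? board pit).getD 0
  if stones == 0 then pit
  else
    let opp_mancala : Int := if 0 ≤ pit ∧ pit ≤ 7 then 17 else 8
    let skip : Int := if pit < opp_mancala ∧ opp_mancala ≤ pit + stones then 1 else 0
    PySem.Int.mod (pit + stones + skip) board.length

-- ===== PRECONDITION & SPEC =====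
-- Pre_ excludes pit out of range (Python A raises IndexError) and a negative stone count at the
-- chosen pit: a negative count is not a meaningful mancala state, and neither program's value
-- there is specified by the game.
def Pre_get_drop_position (pit : Int) (board : List Int) : Prop :=
  PySem.Raise.InRange board.length pit ∧ 0 ≤ (PySem.List.pyGet? board pit).getD 0
instance (pit : Int) (board : List Int) : Decidable (Pre_get_drop_position pit board) := by
  unfold Pre_get_drop_position; infer_instance

def pvWitness_get_drop_position : Int × List Int := (1, [3, 4, 0, 2])

def Spec_get_drop_position (pit : Int) (board : List Int) (out : Int) : Prop := out = get_drop_position_alt pit board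
instance (pit : Int) (board : List Int) (out : Int) : Decidable (Spec_get_drop_position pit board out) := by unfold Spec_get_drop_position; infer_instance

-- ===== CLAIM (what is proved, stated in full; the proofs are below) =====
def Claim_equal_get_drop_position : Prop := ∀ (pit : Int) (board : List Int), Dom_get_drop_position pit board → Pre_get_drop_position pit board → Spec_get_drop_position pit board (get_drop_position pit board)

-- ===== LEMMAS AND PROOFS =====

-- closed form of A's loop
theorem dropLoop_eq (n M : Int) (moves pit : Int) :
    dropLoop n M moves pit =
      if moves ≤ 0 then pit
      else pit + moves +
        (if pit ≤ M - PySem.Int.mod 1 n ∧ M - PySem.Int.mod 1 n < pit + moves then 1 else 0) := by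
  induction moves, pit using dropLoop.induct n M with
  | case1 moves pit hpos hcond ih =>
    rw [dropLoop, if_pos hpos, if_pos hcond, ih]
    have hc : pit + PySem.Int.mod 1 n = M := beq_iff_eq.mp hcond
    split_ifs <;> omega
  | case2 moves pit hpos hcond ih =>
    rw [dropLoop, if_pos hpos, if_neg hcond, ih]
    have hc : ¬ pit + PySem.Int.mod 1 n = M := fun h => hcond (beq_iff_eq.mpr h)
    split_ifs <;> omega
  | case3 moves pit hpos =>
    rw [dropLoop, if_neg hpos]
    split_ifs <;> omega

theorem mancala_eq (pit : Int) :
    mancala_of (1 - player_who_can_do pit) = (if 0 ≤ pit ∧ pit ≤ 7 then 17 else 8) := by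
  have hr : pits_of 0 = [0, 1, 2, 3, 4, 5, 6, 7] := by decide
  unfold player_who_can_do
  rw [hr]
  simp only [List.contains_eq_mem, List.mem_cons, List.not_mem_nil, or_false, decide_eq_true_eq]
  by_cases h : pit = 0 ∨ pit = 1 ∨ pit = 2 ∨ pit = 3 ∨ pit = 4 ∨ pit = 5 ∨ pit = 6 ∨ pit = 7
  · rw [if_pos (by simpa using h), if_pos (by omega)]
    decide
  · rw [if_neg (by simpa using h), if_neg (by omega)]
    decide

-- ===== VERDICT (by name: the statement is the Claim_ definition above) =====
theorem get_drop_position_spec : Claim_equal_get_drop_position := by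
  intro pit board _ hpre
  obtain ⟨hrange, hnn⟩ := hpre
  unfold Spec_get_drop_position get_drop_position get_drop_position_alt
  simp only []
  set moves := (PySem.List.pyGet? board pit).getD 0 with hm
  by_cases h0 : moves = 0
  · simp [h0]
  · rw [if_neg (by simpa using h0), if_neg (by simpa using h0)]
    rw [dropLoop_eq, mancala_eq]
    have hmpos : 0 < moves := lt_of_le_of_ne hnn (Ne.symm h0)
    rw [if_neg (by omega)]
    have hn : (0:Int) < board.length := by
      unfold PySem.Raise.InRange at hrange
      omega
    have hskip : ∀ M : Int,
        (if pit ≤ M - 1 ∧ M - 1 < pit + moves then (1:Int) else 0)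
          = (if pit < M ∧ M ≤ pit + moves then 1 else 0) := by
      intro M; split_ifs <;> omega
    by_cases h1 : board.length = 1
    · -- length-1 board: everything is 0 mod 1
      have e1 : ((board.length : Int)) = 1 := by exact_mod_cast h1
      rw [e1]
      simp [PySem.Int.mod]
    · have hmod1 : PySem.Int.mod 1 (board.length : Int) = 1 := by
        rw [PySem.Int.mod_eq_emod_of_pos (by omega)]
        have h2 : (2:Int) ≤ board.length := by
          have : 1 < board.length := lt_of_le_of_ne (by omega) (Ne.symm h1)
          exact_mod_cast this
        exact Int.emod_eq_of_lt (by omega) (by omega)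
      rw [hmod1]
      by_cases hp : 0 ≤ pit ∧ pit ≤ 7
      · simp only [if_pos hp, hskip]
      · simp only [if_neg hp, hskip]
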